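-- pv_equiv track=rewrite | github.com/guigiese/pinkblue-vet | labs/nexio.py | _clean_report_text
-- ===== SOURCE A (Python) =====
-- def _clean_report_text(text: str) -> str:
--     lines = [line.strip() for line in (text or "").splitlines()]
--     cleaned: list[str] = []
--     prev_blank = True
--     for line in lines:
--         if not line:
--             if not prev_blank:
--                 cleaned.append("")
--             prev_blank = True
--             continue
--         cleaned.append(line)
--         prev_blank = False
--     return "\n".join(cleaned).strip()
-- ===== SOURCE B (Python) =====
-- def _clean_report_text(text: str) -> str:
--     # Join the stripped lines into one string, then collapse every run of
--     # newlines to at most two ("\n\n" = one blank line) in a single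
--     # character-level pass, and trim the result.
--     s = "\n".join(line.strip() for line in (text or "").splitlines())
--     out = []
--     i = 0
--     while i < len(s):
--         if s[i] == "\n":
--             j = i + 1
--             while j < len(s) and s[j] == "\n":
--                 j += 1
--             out.append("\n" if j == i + 1 else "\n\n")
--             i = j
--         else:
--             out.append(s[i])
--             i += 1
--     return "".join(out).strip()
-- ===== Notes on version B (the rewrite author's own statement) =====
-- stated objective: alternative
-- what changed: Replaces the line-level accumulator/prev_blank state machine with: join the stripped lines into one string, then collapse every newline run to at most two in a single character-level run-length pass, then strip.
import Mathlib
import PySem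

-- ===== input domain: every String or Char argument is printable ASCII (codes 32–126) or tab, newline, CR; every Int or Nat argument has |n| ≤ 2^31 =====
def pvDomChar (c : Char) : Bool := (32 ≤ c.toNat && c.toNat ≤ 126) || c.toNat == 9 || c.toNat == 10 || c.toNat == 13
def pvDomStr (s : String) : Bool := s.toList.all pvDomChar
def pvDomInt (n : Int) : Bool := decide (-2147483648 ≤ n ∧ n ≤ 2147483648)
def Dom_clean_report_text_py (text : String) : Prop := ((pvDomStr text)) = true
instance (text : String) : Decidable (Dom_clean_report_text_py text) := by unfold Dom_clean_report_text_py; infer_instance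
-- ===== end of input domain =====

-- B replaces A's line-level accumulator/prev_blank state machine by a character-level
-- run-length pass over the joined text (objective: alternative, same cost).

-- ===== PORT A =====
-- loop body of A's 'for line in lines' (cleaned, prev_blank) state machine
def stepA (st : List String × Bool) (line : String) : List String × Bool :=
  if line = "" then
    (if st.2 = false then st.1 ++ [""] else st.1, true)
  else
    (st.1 ++ [line], false)

def clean_report_text_py (text : String) : String :=
  let lines := (PySem.Str.splitlines (if text = "" then "" else text)).map PySem.Str.strip
  let st := lines.foldl stepA ([], true)
  PySem.Str.strip (PySem.Str.join "\n" st.1)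

-- ===== PORT B =====
-- hand port of Source B's while-loop over the characters of s (exact): copy each
-- non-newline character; at a newline, emit "\n" for a run of length 1 and
-- "\n\n" for a longer run, then continue after the run
def collapseNL (l : List Char) : List Char :=
  match l with
  | [] => []
  | c :: cs =>
    if c = '\n' then
      (if (cs.takeWhile (fun d => d = '\n')).length = 0 then ['\n'] else ['\n', '\n'])
        ++ collapseNL (cs.dropWhile (fun d => d = '\n'))
    else c :: collapseNL cs
termination_by l.length
decreasing_by
  · simp only [List.length_cons]
    exact Nat.lt_succ_of_le (List.length_dropWhile_le _ _)
  · simp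

def clean_report_text_py_alt (text : String) : String :=
  let s := PySem.Str.join "\n" ((PySem.Str.splitlines (if text = "" then "" else text)).map PySem.Str.strip)
  PySem.Str.strip (String.ofList (collapseNL s.toList))

-- ===== PRECONDITION & SPEC =====
def Spec_clean_report_text_py (text : String) (out : String) : Prop := out = clean_report_text_py_alt text
instance (text : String) (out : String) : Decidable (Spec_clean_report_text_py text out) := by unfold Spec_clean_report_text_py; infer_instance

-- ===== CLAIM (what is proved, stated in full; the proofs are below) =====
def Claim_equal_clean_report_text_py : Prop := ∀ (text : String), Dom_clean_report_text_py text → Spec_clean_report_text_py text (clean_report_text_py text)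

-- ===== LEMMAS AND PROOFS =====

-- A's loop as a pure recursion over the line list
def auxS : List String → Bool → List String
  | [], _ => []
  | l :: t, pb =>
    if l = "" then (if pb = false then "" :: auxS t true else auxS t true)
    else l :: auxS t false

-- the same recursion at the char-list level
def auxC : List (List Char) → Bool → List (List Char)
  | [], _ => []
  | l :: t, pb =>
    if l = [] then (if pb = false then [] :: auxC t true else auxC t true)
    else l :: auxC t false

-- collapse runs of empty lines to a single empty line
def squeeze (ls : List (List Char)) : List (List Char) :=
  match ls with
  | [] => []
  | l :: t =>
    if l = [] then [] :: squeeze (t.dropWhile (fun x => x.isEmpty))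
    else l :: squeeze t
termination_by ls.length
decreasing_by
  · simp only [List.length_cons]
    exact Nat.lt_succ_of_le (List.length_dropWhile_le _ _)
  · simp

def NoNL (ls : List (List Char)) : Prop := ∀ l ∈ ls, '\n' ∉ l

theorem foldA (ls : List String) (acc : List String) (pb : Bool) :
    (ls.foldl stepA (acc, pb)).1 = acc ++ auxS ls pb := by
  induction ls generalizing acc pb with
  | nil => simp [auxS]
  | cons l t ih =>
    by_cases hl : l = "" <;> by_cases hpb : pb = false <;>
      simp [stepA, auxS, hl, hpb, ih, List.append_assoc]

theorem auxSC (ls : List String) (pb : Bool) :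
    (auxS ls pb).map String.toList = auxC (ls.map String.toList) pb := by
  induction ls generalizing pb with
  | nil => simp [auxS, auxC]
  | cons l t ih =>
    by_cases hl : l = ""
    · subst hl
      by_cases hpb : pb = false <;> simp [auxS, auxC, hpb, ih]
    · have hl' : l.toList ≠ [] := by
        simpa [String.toList_eq_nil_iff] using hl
      simp [auxS, auxC, hl, hl', ih]

theorem aux_squeeze (ls : List (List Char)) :
    auxC ls true = squeeze (ls.dropWhile (fun x => x.isEmpty)) ∧ auxC ls false = squeeze ls := by
  induction ls with
  | nil => simp [auxC, squeeze]
  | cons l t ih =>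
    by_cases hl : l = []
    · subst hl
      refine ⟨?_, ?_⟩
      · simpa [auxC, List.dropWhile_cons] using ih.1
      · simp [auxC, squeeze]
        simpa [auxC] using ih.1
    · have hl' : l.isEmpty = false := by simpa [List.isEmpty_iff] using hl
      refine ⟨?_, ?_⟩ <;> simp [auxC, squeeze, hl, hl', ih.2]

theorem go_noNL (isB : Char → Bool) (h : isB '\n' = true) :
    ∀ (s cur : List Char) (acc : List (List Char)), '\n' ∉ cur → (∀ l ∈ acc, '\n' ∉ l) →
      ∀ l ∈ PySem.Chars.splitlines.go isB s cur acc, '\n' ∉ l := by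
  intro s cur acc
  induction s, cur, acc using PySem.Chars.splitlines.go.induct (isB := isB) with
  | case1 cur acc hcur =>
    intro _ hacc l hl
    rw [PySem.Chars.splitlines.go.eq_def] at hl
    simp [hcur] at hl
    exact hacc l hl
  | case2 cur acc hcur =>
    intro hc hacc l hl
    rw [PySem.Chars.splitlines.go.eq_def] at hl
    simp [hcur] at hl
    rcases hl with hl | hl
    · exact hacc l hl
    · subst hl; simpa using hc
  | case3 rest cur acc ih =>
    intro hc hacc
    rw [PySem.Chars.splitlines.go.eq_def]
    exact ih (by simp) (by
      intro l hl
      rcases List.mem_cons.mp hl with hl | hl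
      · subst hl; simpa using hc
      · exact hacc l hl)
  | case4 c rest cur acc hne hB ih =>
    intro hc hacc
    rw [PySem.Chars.splitlines.go.eq_def]
    split
    · rename_i heq
      exact (List.cons_ne_nil _ _ heq).elim
    · rename_i rest' heq
      obtain ⟨hc1, hc2⟩ := List.cons.inj heq
      exact (hne rest' hc1 hc2).elim
    · rename_i c' rest' hne' heq
      obtain ⟨hc1, hc2⟩ := List.cons.inj heq
      subst hc1; subst hc2
      rw [if_pos hB]
      refine ih (by simp) ?_
      intro l hl
      rcases List.mem_cons.mp hl with hl | hl
      · subst hl; simpa using hc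
      · exact hacc l hl
  | case5 c rest cur acc hne hB ih =>
    intro hc hacc
    rw [PySem.Chars.splitlines.go.eq_def]
    split
    · rename_i heq
      exact (List.cons_ne_nil _ _ heq).elim
    · rename_i rest' heq
      obtain ⟨hc1, hc2⟩ := List.cons.inj heq
      exact (hne rest' hc1 hc2).elim
    · rename_i c' rest' hne' heq
      obtain ⟨hc1, hc2⟩ := List.cons.inj heq
      subst hc1; subst hc2
      rw [if_neg hB]
      refine ih ?_ hacc
      intro hmem
      rcases List.mem_cons.mp hmem with hmem | hmem
      · exact hB (hmem ▸ h)
      · exact hc hmem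

theorem splitlines_noNL (s : List Char) : ∀ l ∈ PySem.Chars.splitlines s, '\n' ∉ l := by
  intro l hl
  unfold PySem.Chars.splitlines at hl
  exact go_noNL _ (by decide) s [] [] (by simp) (by simp) l hl

theorem mem_strip {c : Char} {l : List Char} (h : c ∈ PySem.Chars.strip l) : c ∈ l := by
  have h1 : c ∈ PySem.Chars.lstrip l := by
    have := (List.dropWhile_sublist (l := (PySem.Chars.lstrip l).reverse)
      (p := PySem.Chars.isspace)).mem (a := c)
    simp only [PySem.Chars.strip, PySem.Chars.rstrip, List.mem_reverse] at h
    simpa using this h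
  exact (List.dropWhile_sublist (l := l) (p := PySem.Chars.isspace)).mem h1

theorem tw_rep {α : Type} (p : α → Bool) (a : α) (h : p a = true) (m : ℕ) (x : List α) :
    (List.replicate m a ++ x).takeWhile p = List.replicate m a ++ x.takeWhile p := by
  induction m with
  | zero => simp
  | succ m ih => simp [List.replicate_succ, h, ih]

theorem dw_rep {α : Type} (p : α → Bool) (a : α) (h : p a = true) (m : ℕ) (x : List α) :
    (List.replicate m a ++ x).dropWhile p = x.dropWhile p := by
  induction m with
  | zero => simp
  | succ m ih => simp [List.replicate_succ, h, ih]

theorem tw_head (x : List Char) (hx : x.head? ≠ some '\n') :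
    x.takeWhile (fun d => d = '\n') = [] := by
  cases x with
  | nil => simp
  | cons c cs =>
    have : c ≠ '\n' := by simpa using hx
    simp [this]

theorem dw_head (x : List Char) (hx : x.head? ≠ some '\n') :
    x.dropWhile (fun d => d = '\n') = x := by
  cases x with
  | nil => simp
  | cons c cs =>
    have : c ≠ '\n' := by simpa using hx
    simp [this]

theorem join_cons (l : List Char) (t : List (List Char)) (h : t ≠ []) :
    PySem.Chars.join ['\n'] (l :: t) = l ++ '\n' :: PySem.Chars.join ['\n'] t := by
  cases t with
  | nil => exact absurd rfl h
  | cons q r => simp [PySem.Chars.join_cons_cons]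

theorem join_replicate_nil (k : ℕ) :
    PySem.Chars.join ['\n'] (List.replicate (k + 1) []) = List.replicate k '\n' := by
  induction k with
  | zero => simp [PySem.Chars.join_singleton]
  | succ k ih =>
    rw [List.replicate_succ, join_cons _ _ (by simp), ih]
    simp [List.replicate_succ]

theorem join_replicate_append (k : ℕ) (rest : List (List Char)) (h : rest ≠ []) :
    PySem.Chars.join ['\n'] (List.replicate k [] ++ rest)
      = List.replicate k '\n' ++ PySem.Chars.join ['\n'] rest := by
  induction k with
  | zero => simp
  | succ k ih =>
    rw [List.replicate_succ, List.cons_append,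
      join_cons _ _ (by simp [h]), ih]
    simp [List.replicate_succ]

theorem collapseNL_cons_ne (c : Char) (cs : List Char) (hc : c ≠ '\n') :
    collapseNL (c :: cs) = c :: collapseNL cs := by
  rw [collapseNL.eq_def]
  simp [hc]

theorem collapse_append_noNL (l x : List Char) (h : '\n' ∉ l) :
    collapseNL (l ++ x) = l ++ collapseNL x := by
  induction l with
  | nil => simp
  | cons c l' ih =>
    have hc : c ≠ '\n' := fun hc => h (by simp [hc])
    rw [List.cons_append, collapseNL_cons_ne _ _ hc,
      ih (fun hm => h (List.mem_cons_of_mem _ hm)), List.cons_append]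

theorem collapse_replicate_append (k : ℕ) (x : List Char) (hk : 1 ≤ k) (hx : x.head? ≠ some '\n') :
    collapseNL (List.replicate k '\n' ++ x) = List.replicate (min k 2) '\n' ++ collapseNL x := by
  match k, hk with
  | 1, _ =>
    rw [List.replicate_one, List.singleton_append, collapseNL.eq_def]
    simp [tw_head x hx, dw_head x hx]
  | (m + 2), _ =>
    rw [List.replicate_succ, List.cons_append, collapseNL.eq_def]
    have htw : ((List.replicate (m + 1) '\n' ++ x).takeWhile (fun d => d = '\n')).length
        = m + 1 := by
      rw [tw_rep _ _ (by simp), tw_head x hx]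
      simp
    have hdw : (List.replicate (m + 1) '\n' ++ x).dropWhile (fun d => d = '\n') = x := by
      rw [dw_rep _ _ (by simp), dw_head x hx]
    simp [hdw]

theorem head_join_ne_nl (w : List Char) (u' : List (List Char)) (hw : w ≠ []) (hnl : '\n' ∉ w) :
    (PySem.Chars.join ['\n'] (w :: u')).head? ≠ some '\n' := by
  cases w with
  | nil => exact absurd rfl hw
  | cons c w' =>
    have hc : c ≠ '\n' := fun hc => hnl (by simp [hc])
    cases u' with
    | nil => simpa [PySem.Chars.join_singleton] using hc
    | cons q r =>
      rw [join_cons _ _ (by simp)]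
      simpa using hc

theorem squeeze_ne_nil (u : List (List Char)) (h : u ≠ []) : squeeze u ≠ [] := by
  cases u with
  | nil => exact absurd rfl h
  | cons l t =>
    rw [squeeze]
    split_ifs <;> simp

theorem collapseNL_nil : collapseNL [] = [] := by
  rw [collapseNL.eq_def]

theorem squeeze_nil : squeeze [] = [] := by
  rw [squeeze.eq_def]

theorem squeeze_cons_ne (l : List Char) (t : List (List Char)) (hl : l ≠ []) :
    squeeze (l :: t) = l :: squeeze t := by
  rw [squeeze.eq_def]
  simp [hl]

theorem squeeze_cons_nil (t : List (List Char)) :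
    squeeze ([] :: t) = [] :: squeeze (t.dropWhile (fun x => x.isEmpty)) := by
  rw [squeeze.eq_def]
  simp

theorem rep_of_takeWhile (t : List (List Char)) :
    t.takeWhile (fun x => x.isEmpty)
      = List.replicate (t.takeWhile (fun x => x.isEmpty)).length ([] : List Char) := by
  apply List.eq_replicate_of_mem
  intro b hb
  have := List.mem_takeWhile_imp hb
  simpa using this

theorem main' (n : ℕ) : ∀ (rest : List (List Char)), rest.length ≤ n → NoNL rest →
    (∀ w, rest.head? = some w → w ≠ []) →
    ∃ b ≤ 1, collapseNL (PySem.Chars.join ['\n'] rest)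
      = PySem.Chars.join ['\n'] (squeeze rest) ++ List.replicate b '\n' := by
  induction n with
  | zero =>
    intro rest hlen _ _
    have hrest : rest = [] := List.eq_nil_of_length_eq_zero (Nat.le_zero.mp hlen)
    subst hrest
    exact ⟨0, by simp, by simp [PySem.Chars.join_nil, squeeze_nil, collapseNL_nil]⟩
  | succ n ihn =>
    intro rest hlen hnl hhead
    cases rest with
    | nil =>
      exact ⟨0, by simp, by simp [PySem.Chars.join_nil, squeeze_nil, collapseNL_nil]⟩
    | cons l t =>
      have hl : l ≠ [] := hhead l rfl
      have hnl_l : '\n' ∉ l := hnl l (by simp)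
      cases t with
      | nil =>
        refine ⟨0, by simp, ?_⟩
        rw [PySem.Chars.join_singleton, squeeze_cons_ne _ _ hl, squeeze_nil,
          PySem.Chars.join_singleton]
        simpa [collapseNL_nil] using collapse_append_noNL l [] hnl_l
      | cons t0 t' =>
        have htne : t0 :: t' ≠ ([] : List (List Char)) := by simp
        have hnl_t : NoNL (t0 :: t') := fun x hx => hnl x (List.mem_cons_of_mem _ hx)
        obtain ⟨k, hkdef⟩ : ∃ k, ((t0 :: t').takeWhile (fun x => x.isEmpty)).length = k :=
          ⟨_, rfl⟩
        obtain ⟨u, hudef⟩ : ∃ u, (t0 :: t').dropWhile (fun x => x.isEmpty) = u := ⟨_, rfl⟩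
        have hsplit : t0 :: t' = List.replicate k ([] : List Char) ++ u := by
          conv_lhs => rw [← List.takeWhile_append_dropWhile (p := fun x => x.isEmpty)
            (l := t0 :: t')]
          rw [rep_of_takeWhile, hkdef, hudef]
        have hu_head : ∀ w, u.head? = some w → w ≠ [] := by
          intro w hw hwnil
          have := List.head?_dropWhile_not (fun (x : List Char) => x.isEmpty) (t0 :: t')
          rw [hudef, hw] at this
          simp [hwnil] at this
        have hnl_u : NoNL u := by
          intro x hx
          rw [← hudef] at hx
          exact hnl_t x ((List.dropWhile_sublist (fun (x : List Char) => x.isEmpty)).mem hx)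
        have hjoin_rest : PySem.Chars.join ['\n'] (l :: t0 :: t')
            = l ++ '\n' :: PySem.Chars.join ['\n'] (t0 :: t') :=
          join_cons _ _ htne
        have hcoll : collapseNL (PySem.Chars.join ['\n'] (l :: t0 :: t'))
            = l ++ collapseNL ('\n' :: PySem.Chars.join ['\n'] (t0 :: t')) := by
          rw [hjoin_rest]
          exact collapse_append_noNL _ _ hnl_l
        have hsq_rest : squeeze (l :: t0 :: t') = l :: squeeze (t0 :: t') :=
          squeeze_cons_ne _ _ hl
        by_cases hu : u = []
        · -- the tail is entirely blank lines
          subst hu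
          have ht_rep : t0 :: t' = List.replicate k ([] : List Char) := by
            rw [hsplit, List.append_nil]
          have hk1 : 1 ≤ k := by
            by_contra hcon
            have hk0 : k = 0 := by omega
            rw [hk0] at ht_rep
            simp at ht_rep
          obtain ⟨k', rfl⟩ : ∃ k', k = k' + 1 := ⟨k - 1, by omega⟩
          have hjoin_t : PySem.Chars.join ['\n'] (t0 :: t') = List.replicate k' '\n' := by
            rw [ht_rep, join_replicate_nil]
          have hsq_t : squeeze (t0 :: t') = [[]] := by
            rw [ht_rep, List.replicate_succ, squeeze_cons_nil]
            rw [show List.dropWhile (fun (x : List Char) => x.isEmpty)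
                (List.replicate k' ([] : List Char)) = [] from by
              simpa using dw_rep (fun (x : List Char) => x.isEmpty) [] (by simp) k' []]
            rw [squeeze_nil]
          have hcoll2 : collapseNL ('\n' :: PySem.Chars.join ['\n'] (t0 :: t'))
              = List.replicate (min (k' + 1) 2) '\n' := by
            rw [hjoin_t, ← List.replicate_succ]
            have := collapse_replicate_append (k' + 1) [] (by omega) (by simp)
            simpa [collapseNL_nil] using this
          rw [hcoll, hcoll2, hsq_rest, hsq_t,
            join_cons _ _ (by simp), PySem.Chars.join_singleton]
          rcases Nat.lt_or_ge k' 1 with hk' | hk'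
          · have hz : k' = 0 := by omega
            subst hz
            exact ⟨0, by simp, by simp⟩
          · have hm : min (k' + 1) 2 = 2 := by omega
            rw [hm]
            exact ⟨1, le_refl 1, by simp [List.replicate_succ]⟩
        · -- u is nonempty and starts with a nonblank line
          obtain ⟨w, u', rfl⟩ : ∃ w u', u = w :: u' := by
            cases hue : u with
            | nil => exact absurd hue hu
            | cons a b => exact ⟨a, b, rfl⟩
          have hw : w ≠ [] := hu_head w rfl
          have hwe : w.isEmpty = false := by simpa using hw
          have hwnl : '\n' ∉ w := hnl_u w (by simp)
          have hjoin_t : PySem.Chars.join ['\n'] (t0 :: t')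
              = List.replicate k '\n' ++ PySem.Chars.join ['\n'] (w :: u') := by
            conv_lhs => rw [hsplit]
            exact join_replicate_append _ _ (by simp)
          have hhead_join : (PySem.Chars.join ['\n'] (w :: u')).head? ≠ some '\n' :=
            head_join_ne_nl w u' hw hwnl
          have hcoll2 : collapseNL ('\n' :: PySem.Chars.join ['\n'] (t0 :: t'))
              = List.replicate (min (k + 1) 2) '\n'
                ++ collapseNL (PySem.Chars.join ['\n'] (w :: u')) := by
            rw [hjoin_t, ← List.cons_append, ← List.replicate_succ]
            exact collapse_replicate_append (k + 1) _ (by omega) hhead_join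
          have hulen : (w :: u').length ≤ n := by
            have h1 : (w :: u').length ≤ (t0 :: t').length := by
              rw [← hudef]
              exact List.length_dropWhile_le _ _
            have h2 : (l :: t0 :: t').length ≤ n + 1 := hlen
            simp only [List.length_cons] at h1 h2 ⊢
            omega
          obtain ⟨b, hb, hcb⟩ := ihn (w :: u') hulen hnl_u hu_head
          have hsqu_ne : squeeze (w :: u') ≠ [] := squeeze_ne_nil _ (by simp)
          refine ⟨b, hb, ?_⟩
          by_cases hk0 : k = 0
          · have ht_u : t0 :: t' = w :: u' := by
              rw [hsplit, hk0]
              simp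
            rw [hcoll, hcoll2, hk0, hcb, hsq_rest, ht_u, join_cons _ _ hsqu_ne]
            simp [List.append_assoc]
          · have hsq_t : squeeze (t0 :: t') = [] :: squeeze (w :: u') := by
              obtain ⟨k', rfl⟩ : ∃ k', k = k' + 1 := ⟨k - 1, by omega⟩
              conv_lhs => rw [hsplit]
              rw [List.replicate_succ, List.cons_append, squeeze_cons_nil]
              rw [dw_rep _ _ (by simp)]
              simp [hwe]
            have hm : min (k + 1) 2 = 2 := by omega
            rw [hcoll, hcoll2, hm, hcb, hsq_rest, hsq_t,
              join_cons _ _ (by simp), join_cons _ _ hsqu_ne]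
            simp [List.replicate_succ, List.append_assoc]

theorem strip_prepend_ws (a : ℕ) (x : List Char) :
    PySem.Chars.strip (List.replicate a '\n' ++ x) = PySem.Chars.strip x := by
  simp only [PySem.Chars.strip, PySem.Chars.lstrip]
  rw [dw_rep _ _ (by decide)]

theorem strip_append_ws (x : List Char) (b : ℕ) :
    PySem.Chars.strip (x ++ List.replicate b '\n') = PySem.Chars.strip x := by
  simp only [PySem.Chars.strip, PySem.Chars.lstrip, PySem.Chars.rstrip]
  have hrep : ∀ y : List Char, (List.replicate b '\n' ++ y).dropWhile PySem.Chars.isspace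
      = y.dropWhile PySem.Chars.isspace := fun y => dw_rep _ _ (by decide) b y
  rw [List.dropWhile_append]
  by_cases h : (x.dropWhile PySem.Chars.isspace).isEmpty
  · have h' : x.dropWhile PySem.Chars.isspace = [] := by simpa using h
    have : (List.replicate b '\n').dropWhile PySem.Chars.isspace = [] := by
      have := hrep []
      simpa using this
    simp [h', this]
  · rw [if_neg h, List.reverse_append, List.reverse_replicate, hrep]

theorem key (ls : List (List Char)) (h : NoNL ls) :
    PySem.Chars.strip (PySem.Chars.join ['\n'] (auxC ls true))
      = PySem.Chars.strip (collapseNL (PySem.Chars.join ['\n'] ls)) := by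
  obtain ⟨k, hkdef⟩ : ∃ k, (ls.takeWhile (fun x => x.isEmpty)).length = k := ⟨_, rfl⟩
  obtain ⟨u, hudef⟩ : ∃ u, ls.dropWhile (fun x => x.isEmpty) = u := ⟨_, rfl⟩
  have hsplit : ls = List.replicate k ([] : List Char) ++ u := by
    conv_lhs => rw [← List.takeWhile_append_dropWhile (p := fun x => x.isEmpty) (l := ls)]
    rw [rep_of_takeWhile, hkdef, hudef]
  have hu_head : ∀ w, u.head? = some w → w ≠ [] := by
    intro w hw hwnil
    have := List.head?_dropWhile_not (fun (x : List Char) => x.isEmpty) ls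
    rw [hudef, hw] at this
    simp [hwnil] at this
  have hnl_u : NoNL u := by
    intro x hx
    rw [← hudef] at hx
    exact h x ((List.dropWhile_sublist (fun (x : List Char) => x.isEmpty)).mem hx)
  have hA : auxC ls true = squeeze u := by
    rw [(aux_squeeze ls).1, hudef]
  rw [hA]
  by_cases hu : u = []
  · subst hu
    have hlsrep : ls = List.replicate k ([] : List Char) := by
      rw [hsplit, List.append_nil]
    rw [squeeze_nil, PySem.Chars.join_nil, hlsrep]
    cases k with
    | zero => simp [PySem.Chars.join_nil, collapseNL_nil]
    | succ k' =>
      rw [join_replicate_nil]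
      cases k' with
      | zero => simp [collapseNL_nil]
      | succ m =>
        have := collapse_replicate_append (m + 1) [] (by omega) (by simp)
        rw [List.append_nil, collapseNL_nil, List.append_nil] at this
        rw [this]
        have := strip_prepend_ws (min (m + 1) 2) []
        rw [List.append_nil] at this
        rw [this]
  · have hjoin_ls : PySem.Chars.join ['\n'] ls
        = List.replicate k '\n' ++ PySem.Chars.join ['\n'] u := by
      conv_lhs => rw [hsplit]
      exact join_replicate_append _ _ hu
    obtain ⟨w, u', rfl⟩ : ∃ w u', u = w :: u' := by
      cases hue : u with
      | nil => exact absurd hue hu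
      | cons a b => exact ⟨a, b, rfl⟩
    have hw : w ≠ [] := hu_head w rfl
    have hwnl : '\n' ∉ w := hnl_u w (by simp)
    have hhead_join : (PySem.Chars.join ['\n'] (w :: u')).head? ≠ some '\n' :=
      head_join_ne_nl w u' hw hwnl
    have hstep : PySem.Chars.strip (collapseNL (PySem.Chars.join ['\n'] ls))
        = PySem.Chars.strip (collapseNL (PySem.Chars.join ['\n'] (w :: u'))) := by
      cases k with
      | zero => rw [hjoin_ls]; simp
      | succ m =>
        rw [hjoin_ls, collapse_replicate_append (m + 1) _ (by omega) hhead_join,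
          strip_prepend_ws]
    rw [hstep]
    obtain ⟨b, _, hcb⟩ := main' (w :: u').length (w :: u') le_rfl hnl_u hu_head
    rw [hcb, strip_append_ws]

theorem final_chars (t : String) :
    PySem.Str.strip (PySem.Str.join "\n"
        ((((PySem.Str.splitlines t).map PySem.Str.strip).foldl stepA ([], true)).1))
      = PySem.Str.strip (String.ofList (collapseNL
          (PySem.Str.join "\n" ((PySem.Str.splitlines t).map PySem.Str.strip)).toList)) := by
  have hmapl : ((PySem.Str.splitlines t).map PySem.Str.strip).map String.toList
      = (PySem.Chars.splitlines t.toList).map PySem.Chars.strip := by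
    rw [List.map_map]
    rw [show String.toList ∘ PySem.Str.strip = PySem.Chars.strip ∘ String.toList from
      funext fun s => PySem.Str.toList_strip s]
    rw [← List.map_map, PySem.Str.splitlines_map_toList]
  have hnl : NoNL ((PySem.Chars.splitlines t.toList).map PySem.Chars.strip) := by
    intro l hl
    obtain ⟨l0, hl0, rfl⟩ := List.mem_map.mp hl
    intro hmem
    exact splitlines_noNL t.toList l0 hl0 (mem_strip hmem)
  have hfold : ((((PySem.Str.splitlines t).map PySem.Str.strip).foldl stepA ([], true)).1)
      = auxS ((PySem.Str.splitlines t).map PySem.Str.strip) true := by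
    simpa using foldA ((PySem.Str.splitlines t).map PySem.Str.strip) [] true
  have hsep : ("\n" : String).toList = ['\n'] := rfl
  have hX : (PySem.Str.join "\n"
      (auxS ((PySem.Str.splitlines t).map PySem.Str.strip) true)).toList
      = PySem.Chars.join ['\n']
          (auxC ((PySem.Chars.splitlines t.toList).map PySem.Chars.strip) true) := by
    rw [PySem.Str.toList_join, auxSC, hmapl, hsep]
  have hY : (String.ofList (collapseNL
      (PySem.Str.join "\n" ((PySem.Str.splitlines t).map PySem.Str.strip)).toList)).toList
      = collapseNL (PySem.Chars.join ['\n']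
          ((PySem.Chars.splitlines t.toList).map PySem.Chars.strip)) := by
    rw [String.toList_ofList, PySem.Str.toList_join, hmapl, hsep]
  have hstrip : ∀ s, PySem.Str.strip s = String.ofList (PySem.Chars.strip s.toList) :=
    fun _ => rfl
  rw [hfold, hstrip, hstrip, hX, hY]
  exact congrArg String.ofList (key _ hnl)

-- ===== VERDICT (by name: the statement is the Claim_ definition above) =====
theorem clean_report_text_py_spec : Claim_equal_clean_report_text_py := by
  intro text _
  unfold Spec_clean_report_text_py clean_report_text_py clean_report_text_py_alt
  exact final_chars (if text = "" then "" else text)
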